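-- pv_equiv track=rewrite | github.com/persolb/PointAndClickMaker | generate_character_image.py | _cluster_line_positions
-- ===== SOURCE A (Python) =====
-- from typing import Any, Dict, List, Optional, Tuple
--
-- def _cluster_line_positions(indices: List[int]) -> List[int]:
--     if not indices:
--         return []
--     clusters = []
--     current = [indices[0]]
--     for idx in indices[1:]:
--         if idx == current[-1] + 1:
--             current.append(idx)
--         else:
--             clusters.append(current)
--             current = [idx]
--     clusters.append(current)
--     return [int(sum(cluster) / len(cluster)) for cluster in clusters]
-- ===== SOURCE B (Python) =====
-- from typing import List
--
-- def _run_center(start: int, length: int) -> int: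
--     # truncated-toward-zero mean of the run start..start+length-1
--     s = 2 * start + length - 1  # twice the mean
--     return s // 2 if s >= 0 else -((-s) // 2)
--
-- def _cluster_line_positions(indices: List[int]) -> List[int]:
--     centers: List[int] = []
--     start = None
--     length = 0
--     for idx in indices:
--         if start is not None and idx == start + length:
--             length += 1
--         else:
--             if start is not None:
--                 centers.append(_run_center(start, length))
--             start, length = idx, 1
--     if start is not None:
--         centers.append(_run_center(start, length))
--     return centers
-- ===== Notes on version B (the rewrite author's own statement) =====
-- stated objective: alternative
-- what changed: B keeps only (run start, run length) as O(1) state per cluster and emits each center by the closed form trunc((2*start+length-1)/2), instead of A's accumulating explicit cluster lists and then mapping int(sum/len) over them.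
import Mathlib
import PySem

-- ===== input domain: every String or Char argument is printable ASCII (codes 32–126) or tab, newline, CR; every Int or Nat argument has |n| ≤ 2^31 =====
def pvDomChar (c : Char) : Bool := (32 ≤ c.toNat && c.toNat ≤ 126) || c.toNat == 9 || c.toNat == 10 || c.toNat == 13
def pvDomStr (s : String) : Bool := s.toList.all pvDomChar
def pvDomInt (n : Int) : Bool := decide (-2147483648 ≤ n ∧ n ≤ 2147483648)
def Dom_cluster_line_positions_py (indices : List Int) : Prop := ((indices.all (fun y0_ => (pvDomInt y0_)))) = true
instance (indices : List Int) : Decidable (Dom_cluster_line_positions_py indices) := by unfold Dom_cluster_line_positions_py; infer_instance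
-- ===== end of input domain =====

-- B replaces A's explicit cluster lists + int(sum/len) by O(1) (start,length) run state and a
-- closed-form truncated mean per run (alternative decomposition; no speed claim).

-- ===== PORT A =====
-- one step of A's for-loop: state = (clusters, current); current is always nonempty
def pvStepA (s : List (List Int) × List Int) (idx : Int) : List (List Int) × List Int :=
  if idx = s.2.getLast! + 1 then (s.1, s.2 ++ [idx]) else (s.1 ++ [s.2], [idx])

-- int(sum(cluster)/len(cluster)): ported as truncated integer division (Int.tdiv). Exact here:
-- every cluster A builds is a run of consecutive ints with |element| ≤ 2^31, so the true quotient
-- sum/len is a half-integer of magnitude ≤ 2^31 + 1, which Python's float division returns exactly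
-- and int() truncates toward zero.
def cluster_line_positions_py (indices : List Int) : List Int :=
  match indices with
  | [] => []
  | i0 :: rest =>
    let st := rest.foldl pvStepA ([], [i0])
    (st.1 ++ [st.2]).map (fun c => Int.tdiv c.sum (c.length : Int))

-- ===== PORT B =====
-- _run_center: truncated-toward-zero mean of the run start..start+length-1
def pvRunCenter (start length : Int) : Int :=
  let s := 2 * start + length - 1
  if 0 ≤ s then PySem.Int.floordiv s 2 else -(PySem.Int.floordiv (-s) 2)

-- one step of B's for-loop: state = (centers, open run as Option (start, length))
def pvStepB (s : List Int × Option (Int × Int)) (idx : Int) : List Int × Option (Int × Int) :=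
  match s.2 with
  | some (start, length) =>
    if idx = start + length then (s.1, some (start, length + 1))
    else (s.1 ++ [pvRunCenter start length], some (idx, 1))
  | none => (s.1, some (idx, 1))

def cluster_line_positions_py_alt (indices : List Int) : List Int :=
  let st := indices.foldl pvStepB ([], none)
  match st.2 with
  | some (start, length) => st.1 ++ [pvRunCenter start length]
  | none => st.1

-- ===== PRECONDITION & SPEC =====
def Spec_cluster_line_positions_py (indices : List Int) (out : List Int) : Prop := out = cluster_line_positions_py_alt indices
instance (indices : List Int) (out : List Int) : Decidable (Spec_cluster_line_positions_py indices out) := by unfold Spec_cluster_line_positions_py; infer_instance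

-- ===== CLAIM (what is proved, stated in full; the proofs are below) =====
def Claim_equal_cluster_line_positions_py : Prop := ∀ (indices : List Int), Dom_cluster_line_positions_py indices → Spec_cluster_line_positions_py indices (cluster_line_positions_py indices)

-- ===== LEMMAS AND PROOFS =====

-- the run start, start+1, …, start+L-1
def pvRun (s : Int) (L : Nat) : List Int := (List.range L).map (fun j => s + j)

-- A's per-cluster value
def pvFA (c : List Int) : Int := Int.tdiv c.sum (c.length : Int)

theorem pvRun_succ (s : Int) (L : Nat) : pvRun s (L + 1) = pvRun s L ++ [s + L] := by
  simp [pvRun, List.range_succ]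

theorem pvRun_getLast! (s : Int) (L : Nat) : (pvRun s (L + 1)).getLast! = s + L := by
  rw [pvRun_succ]; simp

theorem pvRun_length (s : Int) (L : Nat) : (pvRun s L).length = L := by
  simp [pvRun]

theorem pvRun_twice_sum (s : Int) (L : Nat) : 2 * (pvRun s L).sum = L * (2 * s + L - 1) := by
  induction L with
  | zero => simp [pvRun]
  | succ L ih =>
    rw [pvRun_succ, List.sum_append]
    push_cast
    push_cast at ih
    simp only [List.sum_cons, List.sum_nil]
    nlinarith [ih]

-- exact rational quotient transferred between denominators (ediv, everything nonneg side)
theorem pv_ediv_half (k L m : Int) (hL : 0 < L) (h : 2 * k = L * m) : k / L = m / 2 := by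
  rcases Int.even_or_odd m with ⟨t, ht⟩ | ⟨t, ht⟩
  · have h' : 2 * k = 2 * (L * t) := by rw [ht] at h; linear_combination h
    have hk : k = L * t := by omega
    have h1 : k / L = t := by rw [hk]; exact Int.mul_ediv_cancel_left t (by omega)
    have h2 : m / 2 = t := by omega
    omega
  · -- m = 2t+1, so L is even: L = 2u, k = L*t + u
    rw [ht] at h
    have hu : ∃ u : Int, L = 2 * u := ⟨k - L * t, by linear_combination -h⟩
    obtain ⟨u, hLu⟩ := hu
    have h' : 2 * k = 2 * (u + L * t) := by linear_combination h + hLu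
    have hk : k = u + L * t := by omega
    have h1 : k / L = u / L + t := by
      rw [hk]; exact Int.add_mul_ediv_left u t (by omega)
    have h2 : u / L = 0 := Int.ediv_eq_zero_of_lt (by omega) (by omega)
    have h3 : m / 2 = t := by omega
    omega

-- the truncated division both programs compute, transferred: tdiv(sum, L) = runCenter
theorem pv_tdiv_center (k L m : Int) (hL : 0 < L) (h : 2 * k = L * m) :
    Int.tdiv k L = (if 0 ≤ m then PySem.Int.floordiv m 2 else -(PySem.Int.floordiv (-m) 2)) := by
  have h2 : (0:Int) < 2 := by omega
  by_cases hm : 0 ≤ m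
  · have hk : 0 ≤ k := by nlinarith
    rw [if_pos hm, PySem.Int.floordiv_eq_ediv_of_pos h2, Int.tdiv_eq_ediv_of_nonneg hk]
    exact pv_ediv_half k L m hL h
  · have hk : k < 0 := by nlinarith
    rw [if_neg hm, PySem.Int.floordiv_eq_ediv_of_pos h2]
    have : Int.tdiv k L = -(Int.tdiv (-k) L) := by
      rw [Int.neg_tdiv]; omega
    rw [this, Int.tdiv_eq_ediv_of_nonneg (by omega)]
    have := pv_ediv_half (-k) L (-m) hL (by nlinarith)
    omega

theorem pvFA_run (s : Int) (L : Nat) :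
    pvFA (pvRun s (L + 1)) = pvRunCenter s ((L : Int) + 1) := by
  have hlen : ((pvRun s (L + 1)).length : Int) = (L : Int) + 1 := by
    rw [pvRun_length]; push_cast; ring
  have hsum := pvRun_twice_sum s (L + 1)
  push_cast at hsum
  rw [pvFA, hlen, pvRunCenter]
  exact pv_tdiv_center _ _ _ (by omega) (by linarith)

-- main loop invariant: A's fold over (clusters, run) mirrors B's fold over (centers, (start,len))
theorem pv_loop_eq (rest : List Int) : ∀ (clusters : List (List Int)) (centers : List Int) (s : Int) (L : Nat),
    clusters.map pvFA = centers →
    (let st := rest.foldl pvStepA (clusters, pvRun s (L + 1));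
     (st.1 ++ [st.2]).map pvFA)
    = (let st := rest.foldl pvStepB (centers, some (s, (L : Int) + 1));
       match st.2 with
       | some (start, length) => st.1 ++ [pvRunCenter start length]
       | none => st.1) := by
  induction rest with
  | nil =>
    intro clusters centers s L hinv
    simp only [List.foldl_nil, List.map_append, hinv, List.map_cons, List.map_nil]
    rw [pvFA_run]
  | cons idx rest ih =>
    intro clusters centers s L hinv
    simp only [List.foldl_cons]
    by_cases hidx : idx = s + (L : Int) + 1
    · have hA : pvStepA (clusters, pvRun s (L + 1)) idx = (clusters, pvRun s (L + 1 + 1)) := by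
        rw [pvStepA]
        rw [if_pos (by rw [pvRun_getLast!]; omega)]
        rw [pvRun_succ s (L + 1)]
        have : idx = s + ((L : Int) + 1) := by omega
        simp [this]
      have hB : pvStepB (centers, some (s, (L : Int) + 1)) idx = (centers, some (s, ((L : Int) + 1) + 1)) := by
        rw [pvStepB]
        simp only
        rw [if_pos (by omega)]
      rw [hA, hB]
      have := ih clusters centers s (L + 1) hinv
      simpa using this
    · have hA : pvStepA (clusters, pvRun s (L + 1)) idx = (clusters ++ [pvRun s (L + 1)], pvRun idx (0 + 1)) := by
        rw [pvStepA]
        rw [if_neg (by rw [pvRun_getLast!]; omega)]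
        simp [pvRun]
      have hB : pvStepB (centers, some (s, (L : Int) + 1)) idx
          = (centers ++ [pvRunCenter s ((L : Int) + 1)], some (idx, ((0 : Nat) : Int) + 1)) := by
        rw [pvStepB]
        simp only
        rw [if_neg (by omega)]
        norm_num
      rw [hA, hB]
      exact ih (clusters ++ [pvRun s (L + 1)]) (centers ++ [pvRunCenter s ((L : Int) + 1)]) idx 0
        (by simp [hinv, pvFA_run])

-- ===== VERDICT (by name: the statement is the Claim_ definition above) =====
theorem cluster_line_positions_py_spec : Claim_equal_cluster_line_positions_py := by
  intro indices _
  unfold Spec_cluster_line_positions_py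
  match indices with
  | [] => rfl
  | i0 :: rest =>
    have hstart : pvStepB (([] : List Int), (none : Option (Int × Int))) i0
        = (([] : List Int), some (i0, ((0 : Nat) : Int) + 1)) := by
      rw [pvStepB]; norm_num
    have h0 : ([i0] : List Int) = pvRun i0 (0 + 1) := by simp [pvRun]
    have := pv_loop_eq rest [] [] i0 0 rfl
    simp only [cluster_line_positions_py, cluster_line_positions_py_alt, List.foldl_cons, hstart]
    rw [h0]
    exact this
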